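-- pv_equiv track=rewrite | github.com/VhahahaV/intention-test-extension | backend/generator.py | get_define_relation_dict
-- ===== SOURCE A (Python) =====
-- def get_define_relation_dict(method_declaration):
--     define_relation_dict = {}
--     for each_info in method_declaration:
--         each_class = each_info['class_name']
--         method_signature = each_info['method_signature']
--         signature_list = define_relation_dict.get(each_class, [])
--         signature_list.append(method_signature)
--         define_relation_dict[each_class] = signature_list
--     return define_relation_dict
-- ===== SOURCE B (Python) =====
-- def get_define_relation_dict(method_declaration):
--     classes = list(dict.fromkeys(r['class_name'] for r in method_declaration))
--     return {cls: [r['method_signature'] for r in method_declaration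
--                   if r['class_name'] == cls]
--             for cls in classes}
-- ===== Notes on version B (the rewrite author's own statement) =====
-- stated objective: alternative
-- what changed: Replaces the single accumulating pass over a mutable dict by a two-phase decomposition: first an ordered dedup of class names, then a dict comprehension that rescans the records per class to collect its signatures.
import Mathlib
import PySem

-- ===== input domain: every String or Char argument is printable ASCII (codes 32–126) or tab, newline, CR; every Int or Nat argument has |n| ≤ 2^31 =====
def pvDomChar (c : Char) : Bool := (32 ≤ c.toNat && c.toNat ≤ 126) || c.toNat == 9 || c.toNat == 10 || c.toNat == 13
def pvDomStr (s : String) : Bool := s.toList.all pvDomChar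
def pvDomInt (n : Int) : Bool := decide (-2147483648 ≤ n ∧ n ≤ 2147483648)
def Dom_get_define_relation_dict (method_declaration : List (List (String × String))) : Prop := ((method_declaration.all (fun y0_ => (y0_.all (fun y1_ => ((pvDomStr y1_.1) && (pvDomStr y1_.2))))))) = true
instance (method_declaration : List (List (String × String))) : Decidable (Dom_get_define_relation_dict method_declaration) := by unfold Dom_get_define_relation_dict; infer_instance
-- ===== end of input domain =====

-- B groups by a different decomposition (ordered dedup of class names, then one comprehension per class)
-- instead of A's single accumulating pass; same value, objective: alternative (not faster).

-- ===== PORT A =====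
-- r['k'] on a record dict (List (String × String), first match); the "" default is only the
-- totalisation of the KeyError case, which Pre_ excludes.
def recGet (r : List (String × String)) (k : String) : String :=
  ((PySem.Dict.mk r).get? k).getD ""

def get_define_relation_dict (method_declaration : List (List (String × String))) : List (String × List String) :=
  (method_declaration.foldl
    (fun d each_info =>
      let each_class := recGet each_info "class_name"
      let method_signature := recGet each_info "method_signature"
      let signature_list := d.getD each_class []
      d.insert each_class (signature_list ++ [method_signature]))
    PySem.Dict.empty).items

-- ===== PORT B =====
def get_define_relation_dict_alt (method_declaration : List (List (String × String))) : List (String × List String) :=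
  let classes := PySem.List.dedup (method_declaration.map (fun r => recGet r "class_name"))
  classes.map (fun cls =>
    (cls, (method_declaration.filter (fun r => recGet r "class_name" == cls)).map
            (fun r => recGet r "method_signature")))

-- ===== PRECONDITION & SPEC =====
-- Pre_ excludes exactly the records missing the 'class_name' or 'method_signature' key, on which A raises KeyError.
def Pre_get_define_relation_dict (method_declaration : List (List (String × String))) : Prop :=
  ∀ r ∈ method_declaration, "class_name" ∈ r.map Prod.fst ∧ "method_signature" ∈ r.map Prod.fst
instance (method_declaration : List (List (String × String))) : Decidable (Pre_get_define_relation_dict method_declaration) := by unfold Pre_get_define_relation_dict; infer_instance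

def pvWitness_get_define_relation_dict : (List (List (String × String))) :=
  [[("class_name", "Foo"), ("method_signature", "f()")],
   [("class_name", "Bar"), ("method_signature", "g(x)")],
   [("class_name", "Foo"), ("method_signature", "h()")]]

def Spec_get_define_relation_dict (method_declaration : List (List (String × String))) (out : List (String × List String)) : Prop := out = get_define_relation_dict_alt method_declaration
instance (method_declaration : List (List (String × String))) (out : List (String × List String)) : Decidable (Spec_get_define_relation_dict method_declaration out) := by unfold Spec_get_define_relation_dict; infer_instance

-- ===== CLAIM (what is proved, stated in full; the proofs are below) =====
def Claim_equal_get_define_relation_dict : Prop := ∀ (method_declaration : List (List (String × String))), Dom_get_define_relation_dict method_declaration → Pre_get_define_relation_dict method_declaration → Spec_get_define_relation_dict method_declaration (get_define_relation_dict method_declaration)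

-- ===== LEMMAS AND PROOFS =====

theorem foldA_eq_foldl_pairs (md : List (List (String × String))) :
    md.foldl
      (fun d each_info =>
        let each_class := recGet each_info "class_name"
        let method_signature := recGet each_info "method_signature"
        let signature_list := d.getD each_class []
        d.insert each_class (signature_list ++ [method_signature]))
      PySem.Dict.empty
    = (md.map (fun r => (recGet r "class_name", recGet r "method_signature"))).foldl
        (fun d p => d.modify p.1 [] (· ++ [p.2])) PySem.Dict.empty := by
  rw [List.foldl_map]
  rfl

theorem get_define_relation_dict_spec_aux (md : List (List (String × String))) :
    get_define_relation_dict md = get_define_relation_dict_alt md := by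
  unfold get_define_relation_dict get_define_relation_dict_alt
  rw [foldA_eq_foldl_pairs]
  set pf := fun r : List (String × String) => (recGet r "class_name", recGet r "method_signature") with hpf
  set D := (md.map pf).foldl (fun d p => d.modify p.1 [] (· ++ [p.2])) PySem.Dict.empty with hD
  have hnd : D.keys.Nodup := by
    rw [hD]
    exact PySem.Dict.nodup_keys_foldl_modify_key (md.map pf) Prod.fst [] (fun d x => (· ++ [x.2])) _
      PySem.Dict.nodup_keys_empty
  have hkeys : D.keys = PySem.Set.ofList (md.map (fun r => recGet r "class_name")) := by
    rw [hD]
    have := PySem.Dict.keys_foldl_modify_key (l := md.map pf) (key := Prod.fst)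
      (d0 := ([] : List String)) (f := fun d x => (· ++ [x.2])) (d := PySem.Dict.empty)
    rw [this, PySem.Dict.keys_empty, PySem.Set.update_nil_left, List.map_map]
    rfl
  rw [PySem.Dict.items_eq_map_keys D hnd [], hkeys]
  simp only [PySem.List.dedup_eq_ofList]
  apply List.map_congr_left
  intro c _
  congr 1
  rw [hD, PySem.Dict.getD_foldl_modify_append, PySem.Dict.getD_empty]
  simp only [List.nil_append, List.filter_map, List.map_map]
  rfl

-- ===== VERDICT (by name: the statement is the Claim_ definition above) =====
theorem get_define_relation_dict_spec : Claim_equal_get_define_relation_dict := by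
  intro md _ _
  exact get_define_relation_dict_spec_aux md
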